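-- pv_equiv track=rewrite | github.com/seleniumbase/SeleniumBase | seleniumbase/common/encryption.py | reverse_shuffle_string
-- ===== SOURCE A (Python) =====
-- def reverse_shuffle_string(string):
--     if len(string) < 2:
--         return string
--     new_string = ""
--     odd = (len(string) % 2 == 1)
--     part1 = string[:int(len(string) / 2):1]
--     part2 = string[int(len(string) / 2)::1]
--     for c in range(len(part1)):
--         new_string += part2[c]
--         new_string += part1[c]
--     if odd:
--         new_string += part2[-1]
--     return new_string
-- ===== SOURCE B (Python) =====
-- def reverse_shuffle_string(string):
--     m = len(string) // 2
--     return ''.join(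
--         string[m + i // 2] if i % 2 == 0 else string[i // 2]
--         for i in range(len(string))
--     )
-- ===== Notes on version B (the rewrite author's own statement) =====
-- stated objective: simpler
-- what changed: Replaced the half-split slices, the character-by-character interleaving loop and the odd-length tail special case by a single comprehension over output positions using a closed-form parity/index mapping (string[m+i//2] for even i, string[i//2] for odd i) joined at once.
import Mathlib
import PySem

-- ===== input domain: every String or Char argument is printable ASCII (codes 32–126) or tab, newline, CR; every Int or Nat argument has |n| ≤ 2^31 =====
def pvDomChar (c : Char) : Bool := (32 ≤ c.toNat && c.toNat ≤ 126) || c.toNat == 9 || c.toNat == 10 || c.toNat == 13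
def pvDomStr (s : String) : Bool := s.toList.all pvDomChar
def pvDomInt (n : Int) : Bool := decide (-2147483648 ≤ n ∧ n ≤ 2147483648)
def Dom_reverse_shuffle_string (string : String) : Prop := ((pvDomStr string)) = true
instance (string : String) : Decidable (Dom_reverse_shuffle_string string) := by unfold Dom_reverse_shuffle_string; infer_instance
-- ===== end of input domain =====

-- B replaces the half-split + interleave loop of A by a single pass over output
-- positions using a closed-form parity/index mapping (simpler decomposition).


-- ===== PORT A =====
-- literal port of A: split into halves via slices, interleave by an index loop
-- building the string by repeated append, append the odd tail.
def reverse_shuffle_string (string : String) : String :=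
  if PySem.Str.len string < 2 then string
  else
    let l := string.toList
    let odd : Bool := PySem.Int.mod (PySem.Str.len string) 2 == 1
    let half : Int := PySem.Int.truncdiv (PySem.Str.len string) 2   -- int(len(string) / 2)
    let part1 := PySem.List.slice l none (some half)
    let part2 := PySem.List.slice l (some half) none
    let new_string :=
      (PySem.List.pyRange 0 (part1.length : Int) 1).foldl
        (fun acc c => (acc ++ [PySem.List.pyGetD part2 c ' ']) ++ [PySem.List.pyGetD part1 c ' ']) []
    let new_string := if odd then new_string ++ [PySem.List.pyGetD part2 (-1) ' '] else new_string
    String.ofList new_string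

-- ===== PORT B =====
-- literal port of B: one pass over output positions, closed-form index mapping.
def reverse_shuffle_string_alt (string : String) : String :=
  let l := string.toList
  let m := l.length / 2
  String.ofList ((List.range l.length).map (fun i =>
    if i % 2 = 0 then l.getD (m + i / 2) ' ' else l.getD (i / 2) ' '))

-- ===== PRECONDITION & SPEC =====
def Spec_reverse_shuffle_string (string : String) (out : String) : Prop := out = reverse_shuffle_string_alt string
instance (string : String) (out : String) : Decidable (Spec_reverse_shuffle_string string out) := by unfold Spec_reverse_shuffle_string; infer_instance

-- ===== CLAIM (what is proved, stated in full; the proofs are below) =====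
def Claim_equal_reverse_shuffle_string : Prop := ∀ (string : String), Dom_reverse_shuffle_string string → Spec_reverse_shuffle_string string (reverse_shuffle_string string)

-- ===== LEMMAS AND PROOFS =====

-- interleaving two index functions equals one parity-indexed pass of twice the length
theorem pv_interleave_flat (f g : Nat → Char) (m : Nat) :
    (List.range m).flatMap (fun c => [f c, g c])
      = (List.range (2*m)).map (fun i => if i % 2 = 0 then f (i/2) else g (i/2)) := by
  induction m with
  | zero => simp
  | succ m ih =>
    have h2 : 2 * (m+1) = (2*m + 1) + 1 := by omega
    rw [List.range_succ, h2, List.range_succ, List.range_succ]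
    have e1 : (2*m) % 2 = 0 := by omega
    have e2 : (2*m) / 2 = m := by omega
    have e3 : (2*m + 1) % 2 = 1 := by omega
    have e4 : (2*m + 1) / 2 = m := by omega
    simp [ih, e1, e2, e3, e4]

theorem pv_tdiv_two (n : Nat) : PySem.Int.truncdiv (n : Int) 2 = ((n/2 : Nat) : Int) := by
  simp [PySem.Int.truncdiv, Int.tdiv_eq_ediv]

theorem reverse_shuffle_string_eq_alt (string : String) :
    reverse_shuffle_string string = reverse_shuffle_string_alt string := by
  unfold reverse_shuffle_string reverse_shuffle_string_alt
  simp only [PySem.Str.len_eq]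
  by_cases hsmall : ((string.toList.length : Int) < 2)
  · rw [if_pos hsmall]
    have hn2 : string.toList.length < 2 := by exact_mod_cast hsmall
    conv_lhs => rw [← String.ofList_toList (s := string)]
    generalize string.toList = l at hn2 ⊢
    match l, hn2 with
    | [], _ => simp
    | [c], _ => simp
  · rw [if_neg hsmall]
    simp only [pv_tdiv_two,
      PySem.List.slice_to_natCast, PySem.List.slice_from_natCast]
    have hn2 : 2 ≤ string.toList.length := by
      by_contra h
      exact hsmall (by exact_mod_cast Nat.lt_of_not_le h)
    generalize string.toList = l at hn2 ⊢
    set n := l.length with hn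
    set m := n / 2 with hm
    set p1 := l.take m with hp1
    set p2 := l.drop m with hp2
    have hlp1 : p1.length = m := by
      simp [hp1]
      omega
    have hlp2 : p2.length = n - m := by simp [hp2, hn]
    -- the loop: foldl over pyRange = flatMap over range
    have hloop :
        (PySem.List.pyRange 0 ((p1.length : Nat) : Int) 1).foldl
          (fun acc c => (acc ++ [PySem.List.pyGetD p2 c ' ']) ++ [PySem.List.pyGetD p1 c ' ']) []
        = (List.range m).flatMap (fun c => [p2.getD c ' ', p1.getD c ' ']) := by
      rw [hlp1, PySem.List.pyRange_zero_nat, List.foldl_map]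
      have hfun : (fun (acc : List Char) (c : Nat) =>
            (acc ++ [PySem.List.pyGetD p2 ((c : Nat) : Int) ' ']) ++ [PySem.List.pyGetD p1 ((c : Nat) : Int) ' '])
          = fun acc c => acc ++ [p2.getD c ' ', p1.getD c ' '] := by
        funext acc c
        simp [PySem.List.pyGetD_natCast]
      rw [hfun, PySem.List.foldl_append_eq_flatMap]
      simp
    rw [hloop, pv_interleave_flat]
    -- pointwise equality of the two parity maps on range (2*m)
    have hptwise : ∀ i ∈ List.range (2*m),
        (if i % 2 = 0 then p2.getD (i/2) ' ' else p1.getD (i/2) ' ')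
        = (if i % 2 = 0 then l.getD (m + i/2) ' ' else l.getD (i/2) ' ') := by
      intro i hi
      rw [List.mem_range] at hi
      by_cases he : i % 2 = 0
      · simp only [he, if_pos]
        simp [hp2, List.getD, List.getElem?_drop]
      · simp only [if_neg he]
        have hi2 : i / 2 < m := by omega
        simp [hp1, List.getD, hi2]
    by_cases hodd : n % 2 = 1
    · -- odd length: tail element
      have hmodeq : PySem.Int.mod (n : Int) 2 = ((n % 2 : Nat) : Int) := by
        exact_mod_cast PySem.Int.mod_natCast n 2
      have hbool : (PySem.Int.mod (n : Int) 2 == 1) = true := by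
        rw [hmodeq, hodd]
        rfl
      rw [hbool]
      have hp2ne : p2 ≠ [] := by
        intro h
        have := congrArg List.length h
        simp [hlp2] at this
        omega
      have hnm : n = 2*m + 1 := by omega
      have he1 : (2*m) % 2 = 0 := by omega
      have he2 : (2*m) / 2 = m := by omega
      -- the tail: p2[-1] = l[m + m]
      have hlast : p2.getLast hp2ne = l.getD (m + m) ' ' := by
        rw [List.getLast_eq_getElem]
        have hx : p2[p2.length - 1] = p2.getD (p2.length - 1) ' ' := by
          rw [List.getD_eq_getElem]
        rw [hx, hlp2]
        have hidx : n - m - 1 = m := by omega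
        rw [hidx]
        simp [hp2, List.getD, List.getElem?_drop]
      rw [PySem.List.pyGetD_neg_one p2 ' ' hp2ne, hlast]
      conv_rhs => rw [hnm, List.range_succ]
      rw [List.map_append, List.map_congr_left hptwise]
      simp [he1, he2]
    · -- even length: no tail
      have hmodeq : PySem.Int.mod (n : Int) 2 = ((n % 2 : Nat) : Int) := by
        exact_mod_cast PySem.Int.mod_natCast n 2
      have h0 : n % 2 = 0 := by omega
      have hbool : (PySem.Int.mod (n : Int) 2 == 1) = false := by
        rw [hmodeq, h0]
        rfl
      rw [hbool]
      simp only [Bool.false_eq_true, if_false]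
      have hnm : n = 2*m := by omega
      conv_rhs => rw [hnm]
      rw [List.map_congr_left hptwise]

-- ===== VERDICT (by name: the statement is the Claim_ definition above) =====
theorem reverse_shuffle_string_spec : Claim_equal_reverse_shuffle_string := by
  intro string _
  unfold Spec_reverse_shuffle_string
  exact reverse_shuffle_string_eq_alt string
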